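-- pv_equiv track=rewrite | github.com/denizxaytac/advent-of-code | 2015/day25/part1.py | get_actual_no
-- ===== SOURCE A (Python) =====
-- def get_actual_no(inp_row, inp_col):
--     layer = 1
--     current_no = 1
--     while True:
--         col = 1
--         row = layer
--         while row > 0:
--             row -= 1
--             col += 1
--             current_no += 1
--             if row == inp_row and col == inp_col:
--                 return current_no
--         layer += 1
-- ===== SOURCE B (Python) =====
-- def get_actual_no(inp_row, inp_col):
--     layer = inp_row + inp_col - 1
--     return layer * (layer - 1) // 2 + inp_col
-- ===== Notes on version B (the rewrite author's own statement) =====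
-- stated objective: faster
-- what changed: Replaced the nested diagonal-walk loops by the closed-form triangular-number formula L(L-1)/2 + col with L = row+col-1.
import Mathlib
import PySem

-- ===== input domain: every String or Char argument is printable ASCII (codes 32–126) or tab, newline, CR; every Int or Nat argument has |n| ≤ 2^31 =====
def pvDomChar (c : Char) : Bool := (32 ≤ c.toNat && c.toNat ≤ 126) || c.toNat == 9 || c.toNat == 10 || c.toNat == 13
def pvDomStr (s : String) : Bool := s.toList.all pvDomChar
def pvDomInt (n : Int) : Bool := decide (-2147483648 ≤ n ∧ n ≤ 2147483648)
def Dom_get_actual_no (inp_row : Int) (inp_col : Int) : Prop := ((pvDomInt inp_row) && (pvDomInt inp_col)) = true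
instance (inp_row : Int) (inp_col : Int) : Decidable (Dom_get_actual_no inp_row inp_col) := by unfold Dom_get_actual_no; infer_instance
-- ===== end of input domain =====

-- B replaces A's nested diagonal-walk loops by the closed-form triangular-number formula (objective: faster).


-- ===== PORT A =====
-- inner 'while row > 0' loop: structural recursion on row (a Nat in A's reachable states);
-- returns 'some current_no' when the target cell is hit, 'none' when the inner loop ends.
def pvInnerA (row : Nat) (col cur ir ic : Int) : Option Int :=
  match row with
  | 0 => none
  | r + 1 =>
    let col' := col + 1
    let cur' := cur + 1
    if (r : Int) = ir ∧ col' = ic then some cur' else pvInnerA r col' cur' ir ic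

-- outer 'while True' loop: fuel makes the same computation total; with Pre_ the fuel is never exhausted.
def pvOuterA (fuel : Nat) (layer cur ir ic : Int) : Int :=
  match fuel with
  | 0 => 0
  | f + 1 =>
    match pvInnerA layer.toNat 1 cur ir ic with
    | some v => v
    | none => pvOuterA f (layer + 1) (cur + layer) ir ic

def get_actual_no (inp_row : Int) (inp_col : Int) : Int :=
  pvOuterA ((inp_row + inp_col).toNat + 1) 1 1 inp_row inp_col

-- ===== PORT B =====
def get_actual_no_alt (inp_row : Int) (inp_col : Int) : Int :=
  let layer := inp_row + inp_col - 1
  PySem.Int.floordiv (layer * (layer - 1)) 2 + inp_col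

-- ===== PRECONDITION & SPEC =====
-- A's walk visits exactly the cells with row ≥ 0 and col ≥ 2; on any other input A loops forever,
-- so exactly those diverging inputs are excluded.
def Pre_get_actual_no (inp_row : Int) (inp_col : Int) : Prop := 0 ≤ inp_row ∧ 2 ≤ inp_col
instance (inp_row : Int) (inp_col : Int) : Decidable (Pre_get_actual_no inp_row inp_col) := by unfold Pre_get_actual_no; infer_instance

def pvWitness_get_actual_no : Int × Int := (3, 4)

def Spec_get_actual_no (inp_row : Int) (inp_col : Int) (out : Int) : Prop := out = get_actual_no_alt inp_row inp_col
instance (inp_row : Int) (inp_col : Int) (out : Int) : Decidable (Spec_get_actual_no inp_row inp_col out) := by unfold Spec_get_actual_no; infer_instance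

-- ===== CLAIM =====
def Claim_equal_get_actual_no : Prop := ∀ (inp_row : Int) (inp_col : Int), Dom_get_actual_no inp_row inp_col → Pre_get_actual_no inp_row inp_col → Spec_get_actual_no inp_row inp_col (get_actual_no inp_row inp_col)

-- ===== LEMMAS AND PROOFS =====

-- Characterisation of the inner loop: it hits the target iff the target lies on this diagonal segment.
theorem pvInnerA_eq (row : Nat) : ∀ (col cur ir ic : Int),
    pvInnerA row col cur ir ic =
      if 0 ≤ ir ∧ ir < (row : Int) ∧ ir + ic = (row : Int) + col then some (cur + (ic - col)) else none := by
  induction row with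
  | zero =>
    intro col cur ir ic
    simp only [pvInnerA]
    rw [if_neg]; omega
  | succ r ih =>
    intro col cur ir ic
    simp only [pvInnerA]
    by_cases h : (r : Int) = ir ∧ col + 1 = ic
    · rw [if_pos h, if_pos (by push_cast; omega)]
      congr 1; omega
    · rw [if_neg h, ih]
      by_cases h2 : 0 ≤ ir ∧ ir < (r : Int) ∧ ir + ic = (r : Int) + (col + 1)
      · rw [if_pos h2, if_pos (by push_cast at h2 ⊢; omega)]
        congr 1; omega
      · rw [if_neg h2, if_neg (by push_cast at h2 ⊢; omega)]

-- The outer loop, with enough fuel: twice its value in closed form (d counts the remaining layers).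
theorem pvOuterA_eq (d : Nat) : ∀ (fuel : Nat) (layer cur ir ic : Int),
    0 ≤ ir → 2 ≤ ic → 1 ≤ layer → layer + (d : Int) = ir + ic - 1 → d < fuel →
    2 * pvOuterA fuel layer cur ir ic =
      2 * cur + (ir + ic - 1 - layer) * (ir + ic - 2 + layer) + 2 * (ic - 1) := by
  induction d with
  | zero =>
    intro fuel layer cur ir ic hir hic hl hsum hf
    obtain ⟨f, rfl⟩ : ∃ f, fuel = f + 1 := ⟨fuel - 1, by omega⟩
    simp only [pvOuterA, pvInnerA_eq]
    rw [if_pos (by omega)]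
    have : ir + ic - 1 - layer = 0 := by omega
    rw [this]; ring_nf
  | succ d ih =>
    intro fuel layer cur ir ic hir hic hl hsum hf
    obtain ⟨f, rfl⟩ : ∃ f, fuel = f + 1 := ⟨fuel - 1, by omega⟩
    simp only [pvOuterA, pvInnerA_eq]
    rw [if_neg (by push_cast at hsum ⊢; omega)]
    rw [ih f (layer + 1) (cur + layer) ir ic hir hic (by omega) (by push_cast at hsum ⊢; omega) (by omega)]
    ring

-- ===== VERDICT =====
theorem get_actual_no_spec : Claim_equal_get_actual_no := by
  intro ir ic _ hpre
  obtain ⟨hir, hic⟩ := hpre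
  unfold Spec_get_actual_no get_actual_no get_actual_no_alt
  show pvOuterA ((ir + ic).toNat + 1) 1 1 ir ic =
    PySem.Int.floordiv ((ir + ic - 1) * (ir + ic - 1 - 1)) 2 + ic
  have key := pvOuterA_eq (ir + ic - 2).toNat ((ir + ic).toNat + 1) 1 1 ir ic hir hic (by omega)
      (by omega) (by omega)
  rw [PySem.Int.floordiv_eq_ediv_of_pos (by omega)]
  have h1 : ir + ic - 1 - 1 = ir + ic - 2 := by omega
  have h2 : ir + ic - 2 + 1 = ir + ic - 1 := by omega
  rw [h1, h2] at key
  have hexp : (ir + ic - 1) * (ir + ic - 1 - 1) = (ir + ic - 2) * (ir + ic - 1) := by ring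
  rw [hexp]
  generalize hM : (ir + ic - 2) * (ir + ic - 1) = M at key ⊢
  have hM0 : 0 ≤ M := by rw [← hM]; exact mul_nonneg (by omega) (by omega)
  omega
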